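-- pv_equiv track=rewrite | github.com/jakubpulaczewski/codewars | 6-kyu/divisibility-by-13.py | thirt
-- ===== SOURCE A (Python) =====
-- def thirt(n):
--     digit_count = len(str(n))
--     digits = list(map(int, str(n)))
--     digits[:] = digits[::-1]
--
--     sum = 0
--     previous = n
--     for i in range(digit_count):
--         sum+= ((10**i) % 13) * digits[i]
--     if previous == sum:
--         return sum
--     else:
--         return thirt(sum)
-- ===== SOURCE B (Python) =====
-- def thirt(n):
--     # Iterative fixed-point loop: single pass over the reversed digit string
--     # with the mod-13 weight updated incrementally (instead of 10**i % 13 each step).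
--     cur = n
--     while True:
--         s, w = 0, 1
--         for c in reversed(str(cur)):
--             s += w * int(c)
--             w = w * 10 % 13
--         if s == cur:
--             return s
--         cur = s
-- ===== Notes on version B (the rewrite author's own statement) =====
-- stated objective: alternative
-- what changed: Replaces self-recursion whose weights are recomputed each digit as 10**i % 13 over an index range with an explicit while-loop fixed-point search doing one pass over the reversed digit string, carrying the mod-13 weight incrementally.
import Mathlib
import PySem

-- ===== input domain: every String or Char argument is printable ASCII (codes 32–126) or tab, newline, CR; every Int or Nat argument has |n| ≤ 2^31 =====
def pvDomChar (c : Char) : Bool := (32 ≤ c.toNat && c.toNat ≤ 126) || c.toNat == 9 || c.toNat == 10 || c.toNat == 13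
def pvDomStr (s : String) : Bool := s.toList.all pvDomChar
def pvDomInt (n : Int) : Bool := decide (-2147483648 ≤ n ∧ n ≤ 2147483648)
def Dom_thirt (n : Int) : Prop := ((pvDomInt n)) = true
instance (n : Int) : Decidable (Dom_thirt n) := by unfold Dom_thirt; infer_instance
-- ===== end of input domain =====

-- B replaces A's self-recursion (weights recomputed as 10**i % 13 over an index range) by an
-- explicit fixed-point loop over the reversed digit string with an incrementally updated mod-13 weight.

-- ===== PORT A =====
-- the recursion 'return thirt(sum)' is run on a fuel counter (totality guard only;
-- n.toNat + 1 iterations always suffice for n ≥ 0, since one pass fixes any n < 100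
-- and strictly decreases any n ≥ 100)
def thirtA : Nat → Int → Int
  | 0, _ => 0   -- fuel exhausted (unreachable for inputs in Pre_)
  | f + 1, n =>
    let digit_count : Int := PySem.Str.len (PySem.Int.toStr n)
    -- list(map(int, str(n))): int of a 1-char string; getD 0 is unreachable on Pre_ (n ≥ 0, all chars are digits)
    let digits : List Int := (PySem.Int.toChars n).map (fun c => (PySem.Int.ofChars? [c]).getD 0)
    let digits : List Int := digits.reverse   -- digits[:] = digits[::-1]
    -- 10**i: i comes from range(digit_count) so i ≥ 0; ** on it is (10 : Int)^i.toNat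
    let sum : Int :=
      (PySem.List.pyRange 0 digit_count 1).foldl
        (fun s i => s + PySem.Int.mod ((10 : Int) ^ i.toNat) 13 * PySem.List.pyGetD digits i 0) 0
    if n = sum then sum else thirtA f sum

def thirt (n : Int) : Int := thirtA (n.toNat + 1) n

-- ===== PORT B =====
-- outer 'while True' loop of Source B (fuel as totality guard, as for A); the inner
-- 'for c in reversed(str(cur))' is a foldl over the reversed char list carrying (s, w);
-- int(c) is PySem.Int.ofChars? [c] (getD 0 unreachable on Pre_: all chars are digits)
def thirtB : Nat → Int → Int
  | 0, _ => 0   -- fuel exhausted (unreachable for inputs in Pre_)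
  | f + 1, cur =>
    let s : Int :=
      ((PySem.Int.toChars cur).reverse.foldl
        (fun (p : Int × Int) c =>
          (p.1 + p.2 * (PySem.Int.ofChars? [c]).getD 0, PySem.Int.mod (p.2 * 10) 13))
        (0, 1)).1
    if s = cur then s else thirtB f s

def thirt_alt (n : Int) : Int := thirtB (n.toNat + 1) n

-- ===== PRECONDITION & SPEC =====
-- Pre_ excludes negative n, on which A raises ValueError (int('-') while mapping over str(n)).
def Pre_thirt (n : Int) : Prop := 0 ≤ n
instance (n : Int) : Decidable (Pre_thirt n) := by unfold Pre_thirt; infer_instance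
def pvWitness_thirt : Int := 1234

def Spec_thirt (n : Int) (out : Int) : Prop := out = thirt_alt n
instance (n : Int) (out : Int) : Decidable (Spec_thirt n out) := by unfold Spec_thirt; infer_instance

-- ===== CLAIM (what is proved, stated in full; the proofs are below) =====
def Claim_equal_thirt : Prop := ∀ (n : Int), Dom_thirt n → Pre_thirt n → Spec_thirt n (thirt n)

-- ===== LEMMAS AND PROOFS =====

-- common specification: weighted digit sum, least-significant digit first, weight 10^k % 13
def wsum : Nat → List Int → Int
  | _, [] => 0
  | k, d :: ds => (10 : Int) ^ k % 13 * d + wsum (k + 1) ds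

theorem pymod_eq (a b : Int) (hb : 0 ≤ b) : PySem.Int.mod a b = a % b := by
  simp [PySem.Int.mod, Int.fmod_eq_emod, hb]

theorem wsum_nonneg (ds : List Int) (hds : ∀ d ∈ ds, 0 ≤ d) : ∀ k, 0 ≤ wsum k ds := by
  induction ds with
  | nil => intro k; simp [wsum]
  | cons d t ih =>
    intro k
    have hd : 0 ≤ d := hds d (by simp)
    have ht := ih (fun x hx => hds x (by simp [hx])) (k + 1)
    have hw : 0 ≤ (10 : Int) ^ k % 13 := Int.emod_nonneg _ (by norm_num)
    simp only [wsum]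
    exact add_nonneg (mul_nonneg hw hd) ht

-- characterization of Nat.toDigits via Nat.digits
theorem toDigitsCore_eq (f : Nat) : ∀ (n : Nat) (ds : List Char), 0 < n → n < f →
    Nat.toDigitsCore 10 f n ds = ((Nat.digits 10 n).map Nat.digitChar).reverse ++ ds := by
  induction f with
  | zero => intro n ds h1 h2; omega
  | succ f ih =>
    intro n ds h1 h2
    rw [Nat.digits_def' (by norm_num : 1 < 10) h1]
    simp only [Nat.toDigitsCore]
    rcases Nat.eq_zero_or_pos (n / 10) with h | h
    · rw [h]
      simp
    · have hne : n / 10 ≠ 0 := by omega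
      rw [if_neg hne]
      rw [ih (n / 10) _ h (by omega)]
      simp

theorem toDigits_eq (n : Nat) (h : 0 < n) :
    Nat.toDigits 10 n = ((Nat.digits 10 n).map Nat.digitChar).reverse := by
  unfold Nat.toDigits
  rw [toDigitsCore_eq (n + 1) n [] h (by omega)]
  simp

-- int(c) on a digit char
theorem ofChars_digitChar (d : Nat) (hd : d < 10) :
    (PySem.Int.ofChars? [Nat.digitChar d]).getD 0 = Int.ofNat d := by
  interval_cases d <;> decide

def intDigits (m : Int) : List Int := (Nat.digits 10 m.toNat).map Int.ofNat

-- the reversed mapped digit char list equals intDigits (n > 0)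
theorem digitsA_eq (n : Int) (h : 0 < n) :
    ((PySem.Int.toChars n).map (fun c => (PySem.Int.ofChars? [c]).getD 0)).reverse = intDigits n := by
  unfold PySem.Int.toChars
  rw [if_neg (by omega)]
  rw [toDigits_eq n.toNat (by omega)]
  rw [← List.map_reverse, List.reverse_reverse, List.map_map]
  unfold intDigits
  apply List.map_congr_left
  intro d hd
  exact ofChars_digitChar d (Nat.digits_lt_base (by norm_num) hd)

-- A's foldl over range computes wsum
theorem foldlA (ds : List Int) : ∀ (a : Nat) (s : Int), a ≤ ds.length →
    (PySem.List.pyRange (a : Int) (ds.length : Int) 1).foldl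
      (fun s i => s + PySem.Int.mod ((10 : Int) ^ i.toNat) 13 * PySem.List.pyGetD ds i 0) s
    = s + wsum a (ds.drop a) := by
  intro a
  induction ha : ds.length - a generalizing a with
  | zero =>
    intro s h
    have : a = ds.length := by omega
    subst this
    rw [PySem.List.pyRange_one_eq_nil (le_refl _)]
    simp [List.drop_length, wsum]
  | succ k ih =>
    intro s h
    have hlt : a < ds.length := by omega
    rw [PySem.List.pyRange_one_cons (by exact_mod_cast hlt)]
    simp only [List.foldl_cons]
    have hcast : ((a : Int) + 1) = ((a + 1 : Nat) : Int) := by push_cast; ring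
    rw [hcast, ih (a + 1) (by omega) _ (by omega)]
    rw [List.drop_eq_getElem_cons hlt]
    simp only [wsum]
    rw [PySem.List.pyGetD_ofNat ds a 0 hlt]
    have htn : ((a : Int)).toNat = a := by omega
    rw [htn, pymod_eq _ _ (by norm_num)]
    ring

-- A's per-pass sum equals wsum 0 (intDigits n) for n ≥ 0
theorem stepA_eq (n : Int) (h : 0 ≤ n) :
    (PySem.List.pyRange 0 (PySem.Str.len (PySem.Int.toStr n)) 1).foldl
      (fun s i => s + PySem.Int.mod ((10 : Int) ^ i.toNat) 13 *
        PySem.List.pyGetD (((PySem.Int.toChars n).map (fun c => (PySem.Int.ofChars? [c]).getD 0)).reverse) i 0) 0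
    = wsum 0 (intDigits n) := by
  rcases eq_or_lt_of_le h with h0 | h0
  · subst h0
    have : intDigits 0 = [] := by simp [intDigits]
    rw [this]
    decide
  · have hlen : PySem.Str.len (PySem.Int.toStr n)
        = ((((PySem.Int.toChars n).map (fun c => (PySem.Int.ofChars? [c]).getD 0)).reverse).length : Int) := by
      simp [PySem.Str.len_eq, PySem.Int.toList_toStr]
    rw [hlen, digitsA_eq n h0]
    have hf := foldlA (intDigits n) 0 0 (by omega)
    simpa using hf

-- B's inner fold over a digit list with incremental weight computes wsum
theorem foldlB (ds : List Int) : ∀ (k : Nat) (s : Int),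
    (ds.foldl (fun (p : Int × Int) d => (p.1 + p.2 * d, PySem.Int.mod (p.2 * 10) 13))
      (s, (10 : Int) ^ k % 13)).1 = s + wsum k ds := by
  induction ds with
  | nil => intro k s; simp [wsum]
  | cons d t ih =>
    intro k s
    simp only [List.foldl_cons]
    have hw : PySem.Int.mod ((10 : Int) ^ k % 13 * 10) 13 = (10 : Int) ^ (k + 1) % 13 := by
      rw [pymod_eq _ _ (by norm_num), Int.mul_emod, Int.emod_emod_of_dvd _ (dvd_refl 13),
        ← Int.mul_emod, pow_succ]
    rw [hw, ih (k + 1)]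
    simp only [wsum]
    ring

-- B's per-pass sum equals wsum 0 (intDigits n) for n ≥ 0
theorem stepB_eq (n : Int) (h : 0 ≤ n) :
    ((PySem.Int.toChars n).reverse.foldl
      (fun (p : Int × Int) c =>
        (p.1 + p.2 * (PySem.Int.ofChars? [c]).getD 0, PySem.Int.mod (p.2 * 10) 13))
      (0, 1)).1 = wsum 0 (intDigits n) := by
  rcases eq_or_lt_of_le h with h0 | h0
  · subst h0
    have : intDigits 0 = [] := by simp [intDigits]
    rw [this]
    decide
  · have hmap : (PySem.Int.toChars n).reverse.foldl
        (fun (p : Int × Int) c =>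
          (p.1 + p.2 * (PySem.Int.ofChars? [c]).getD 0, PySem.Int.mod (p.2 * 10) 13))
        (0, 1)
      = (((PySem.Int.toChars n).map (fun c => (PySem.Int.ofChars? [c]).getD 0)).reverse).foldl
        (fun (p : Int × Int) d => (p.1 + p.2 * d, PySem.Int.mod (p.2 * 10) 13)) (0, 1) := by
      rw [← List.map_reverse, List.foldl_map]
    rw [hmap, digitsA_eq n h0]
    have := foldlB (intDigits n) 0 0
    simpa using this

-- intDigits entries are nonnegative
theorem intDigits_nonneg (m : Int) : ∀ d ∈ intDigits m, 0 ≤ d := by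
  intro d hd
  unfold intDigits at hd
  obtain ⟨x, _, rfl⟩ := List.mem_map.mp hd
  exact Int.natCast_nonneg x

-- the two fueled loops agree on nonnegative inputs
theorem thirtAB (f : Nat) : ∀ (n : Int), 0 ≤ n → thirtA f n = thirtB f n := by
  induction f with
  | zero => intro n _; rfl
  | succ f ih =>
    intro n hn
    rw [thirtA, thirtB]
    simp only [stepA_eq n hn, stepB_eq n hn]
    have hnneg : 0 ≤ wsum 0 (intDigits n) := wsum_nonneg _ (intDigits_nonneg n) 0
    by_cases h : n = wsum 0 (intDigits n)
    · rw [if_pos h, if_pos h.symm]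
    · rw [if_neg h, if_neg (fun hh => h hh.symm)]
      exact ih _ hnneg

-- ===== VERDICT (by name: the statement is the Claim_ definition above) =====
theorem thirt_spec : Claim_equal_thirt := by
  intro n _ hpre
  unfold Spec_thirt thirt thirt_alt
  exact thirtAB (n.toNat + 1) n hpre
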